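-- pv_equiv track=rewrite | github.com/an-jiohh/algorithm-solutions | programmers/파괴되지 않은 건물.py | solution
-- ===== SOURCE A (Python) =====
-- def solution(board, skill):
--     answer = 0
--     rn, cn = len(board), len(board[0])
--     diff = [[0] * (cn+1) for i in range(rn+1)]
--     for t, r1, c1, r2, c2, degree in skill:
--         if t == 1 : degree = -degree
--         diff[r1][c1] += degree
--         diff[r1][c2 + 1] -= degree
--         diff[r2+1][c1] -= degree
--         diff[r2+1][c2+1] += degree
--     for i in range(rn+1):
--         d = diff[i][0]
--         for j in range(1,cn+1):
--             d += diff[i][j]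
--             diff[i][j] = d
--     for i in range(cn+1):
--         d = diff[0][i]
--         for j in range(1,rn+1):
--             d += diff[j][i]
--             diff[j][i] = d
--     for i in range(rn):
--         for j in range(cn):
--             board[i][j] += diff[i][j]
--             if board[i][j] > 0 : answer += 1
--     return answer
-- ===== SOURCE B (Python) =====
-- def solution(board, skill):
--     for t, r1, c1, r2, c2, degree in skill:
--         d = -degree if t == 1 else degree
--         for i in range(r1, r2 + 1):
--             row = board[i]
--             for j in range(c1, c2 + 1):
--                 row[j] += d
--     answer = 0
--     for i in range(len(board)):
--         for j in range(len(board[0])):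
--             if board[i][j] > 0:
--                 answer += 1
--     return answer
-- ===== Notes on version B (the rewrite author's own statement) =====
-- stated objective: simpler
-- what changed: Drops the 2D difference array and its two prefix-sum reconstruction passes: B adds each skill's degree directly into the affected board rectangle and then counts positive cells in one pass.
-- outside the precondition, e.g. on solution([[1, 1], [1, 1]], [[1, 0, -1, 1, 0, 1]]): A returns 4, B returns 0; on solution([[1, 1], [1, 1]], [[2, -1, 0, 0, 1, 1]]): A returns 2, B returns 4; on solution([[1, 1], [1, 1], [1, 1]], [[2, 2, 0, 0, 1, 5]]): A returns 4, B returns 6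
import Mathlib
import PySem

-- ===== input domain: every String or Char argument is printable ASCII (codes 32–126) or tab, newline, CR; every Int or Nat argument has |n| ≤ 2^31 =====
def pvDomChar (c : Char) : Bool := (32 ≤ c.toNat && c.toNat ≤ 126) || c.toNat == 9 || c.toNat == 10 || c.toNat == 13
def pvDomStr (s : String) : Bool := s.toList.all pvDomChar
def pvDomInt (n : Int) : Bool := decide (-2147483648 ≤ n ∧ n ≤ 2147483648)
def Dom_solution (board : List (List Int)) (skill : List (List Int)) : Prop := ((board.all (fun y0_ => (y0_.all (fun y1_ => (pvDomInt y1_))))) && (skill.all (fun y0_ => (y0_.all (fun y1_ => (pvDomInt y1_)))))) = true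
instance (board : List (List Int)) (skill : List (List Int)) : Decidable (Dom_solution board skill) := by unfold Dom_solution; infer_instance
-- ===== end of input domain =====

-- B drops A's 2D difference array and its two prefix-sum passes, adding each skill straight into the
-- board rectangle and counting positive cells (objective: simpler).  Both Pythons mutate `board` in
-- place in the same way; the equivalence proved here is about the RETURN value.

-- ===== PORT A =====
-- shared low-level primitive: Python's `xs[i] = f(xs[i])` for an index that is in range under Pre_
-- (negative index counts from the end as in Python; an out-of-range index — on which Python raises,
-- excluded by Pre_ — leaves the list unchanged)
def pvModifyAt {α : Type} : List α → Nat → (α → α) → List α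
  | [], _, _ => []
  | x :: xs, 0, f => f x :: xs
  | x :: xs, Nat.succ n, f => x :: pvModifyAt xs n f

def pyModify {α : Type} (xs : List α) (i : Int) (f : α → α) : List α :=
  let k : Int := if i < 0 then i + xs.length else i
  pvModifyAt xs k.toNat f

def mod2 (m : List (List Int)) (i j : Int) (f : Int → Int) : List (List Int) :=
  pyModify m i (fun row => pyModify row j f)

-- one iteration of A's skill loop: the four difference-array corner updates
def applyCorner (diff : List (List Int)) (s : List Int) : List (List Int) :=
  match s with
  | [t, r1, c1, r2, c2, degree] =>
      let d := if t = 1 then -degree else degree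
      mod2 (mod2 (mod2 (mod2 diff r1 c1 (· + d)) r1 (c2 + 1) (· - d)) (r2 + 1) c1 (· - d)) (r2 + 1) (c2 + 1) (· + d)
  | _ => diff   -- Python raises on unpacking a non-6-tuple; excluded by Pre_

-- A's first in-place pass: running sum along one row (d = diff[i][0]; d += diff[i][j]; diff[i][j] = d)
def scanAux (d : Int) : List Int → List Int
  | [] => []
  | y :: ys => (d + y) :: scanAux (d + y) ys

def rowScan : List Int → List Int
  | [] => []
  | x :: xs => x :: scanAux x xs

-- A's second in-place pass: running sum down each column (row i becomes row (i-1) + row i, elementwise)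
def colAux (prev : List Int) : List (List Int) → List (List Int)
  | [] => []
  | r :: rs => (List.zipWith (· + ·) prev r) :: colAux (List.zipWith (· + ·) prev r) rs

def colScan : List (List Int) → List (List Int)
  | [] => []
  | r :: rs => r :: colAux r rs

def solution (board : List (List Int)) (skill : List (List Int)) : Int :=
  let rn : Int := board.length
  let cn : Int := (PySem.List.pyGetD board 0 []).length
  let diff0 := List.replicate (rn.toNat + 1) (List.replicate (cn.toNat + 1) (0 : Int))
  let diff1 := skill.foldl applyCorner diff0
  let diff2 := diff1.map rowScan
  let diff3 := colScan diff2
  (PySem.List.pyRange 0 rn 1).foldl (fun acc i =>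
    (PySem.List.pyRange 0 cn 1).foldl (fun acc2 j =>
      if PySem.List.pyGetD (PySem.List.pyGetD board i []) j 0
         + PySem.List.pyGetD (PySem.List.pyGetD diff3 i []) j 0 > 0 then acc2 + 1 else acc2) acc) 0

-- ===== PORT B =====
-- one iteration of B's skill loop: add the (signed) degree to every cell of the rectangle
def addRect (board : List (List Int)) (s : List Int) : List (List Int) :=
  match s with
  | [t, r1, c1, r2, c2, degree] =>
      let d := if t = 1 then -degree else degree
      (PySem.List.pyRange r1 (r2 + 1) 1).foldl (fun m i =>
        pyModify m i (fun row =>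
          (PySem.List.pyRange c1 (c2 + 1) 1).foldl (fun r j => pyModify r j (· + d)) row)) board
  | _ => board   -- Python raises on unpacking a non-6-tuple; excluded by Pre_

def solution_alt (board : List (List Int)) (skill : List (List Int)) : Int :=
  let b := skill.foldl addRect board
  (PySem.List.pyRange 0 (b.length : Int) 1).foldl (fun acc i =>
    (PySem.List.pyRange 0 ((PySem.List.pyGetD b 0 []).length : Int) 1).foldl (fun acc2 j =>
      if PySem.List.pyGetD (PySem.List.pyGetD b i []) j 0 > 0 then acc2 + 1 else acc2) acc) 0

-- ===== PRECONDITION & SPEC =====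
-- Pre_ is the problem's natural domain: a nonempty board whose rows are at least as long as row 0, and
-- each skill a 6-tuple [t,r1,c1,r2,c2,degree] with 0 ≤ r1 ≤ r2 < len(board) and 0 ≤ c1 ≤ c2 < len(board[0]).
-- A raises (IndexError/ValueError) on an empty board, a short row, or a skill entry of another length;
-- on inverted rectangles (r1 > r2 or c1 > c2) and on negative coordinates A still returns, but that value
-- is an accident of the difference array / Python's negative-index wraparound, which B does not reproduce.
def Pre_solution (board : List (List Int)) (skill : List (List Int)) : Prop :=
  board ≠ [] ∧
  (∀ row ∈ board, (board.getD 0 []).length ≤ row.length) ∧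
  (∀ s ∈ skill, s.length = 6 ∧
    0 ≤ s.getD 1 0 ∧ s.getD 1 0 ≤ s.getD 3 0 ∧ s.getD 3 0 < (board.length : Int) ∧
    0 ≤ s.getD 2 0 ∧ s.getD 2 0 ≤ s.getD 4 0 ∧ s.getD 4 0 < ((board.getD 0 []).length : Int))
instance (board : List (List Int)) (skill : List (List Int)) : Decidable (Pre_solution board skill) := by
  unfold Pre_solution; infer_instance

def pvWitness_solution : List (List Int) × List (List Int) := ([[1, -2], [0, 3]], [[1, 0, 0, 1, 1, 2], [2, 0, 1, 1, 1, 5]])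

def Spec_solution (board : List (List Int)) (skill : List (List Int)) (out : Int) : Prop := out = solution_alt board skill
instance (board : List (List Int)) (skill : List (List Int)) (out : Int) : Decidable (Spec_solution board skill out) := by unfold Spec_solution; infer_instance

-- ===== CLAIM (what is proved, stated in full; the proofs are below) =====
def Claim_equal_solution : Prop := ∀ (board : List (List Int)) (skill : List (List Int)), Dom_solution board skill → Pre_solution board skill → Spec_solution board skill (solution board skill)

-- ===== LEMMAS AND PROOFS =====


-- proof-side abstractions
def cellN (m : List (List Int)) (r c : Nat) : Int := (m.getD r []).getD c 0

def contrib (s : List Int) (i j : Int) : Int :=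
  match s with
  | [t, r1, c1, r2, c2, degree] =>
      if r1 ≤ i ∧ i ≤ r2 ∧ c1 ≤ j ∧ j ≤ c2 then (if t = 1 then -degree else degree) else 0
  | _ => 0

def Ftot (skill : List (List Int)) (i j : Int) : Int := (skill.map fun s => contrib s i j).sum

def corner (s : List Int) (r c : Nat) : Int :=
  match s with
  | [t, r1, c1, r2, c2, degree] =>
      let d := if t = 1 then -degree else degree
      (if (r : Int) = r1 ∧ (c : Int) = c1 then d else 0)
      - (if (r : Int) = r1 ∧ (c : Int) = c2 + 1 then d else 0)
      - (if (r : Int) = r2 + 1 ∧ (c : Int) = c1 then d else 0)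
      + (if (r : Int) = r2 + 1 ∧ (c : Int) = c2 + 1 then d else 0)
  | _ => 0

def Gtot (skill : List (List Int)) (r c : Nat) : Int := (skill.map fun s => corner s r c).sum

def SkOK (rn cn : Int) (s : List Int) : Prop :=
  ∃ t r1 c1 r2 c2 dg, s = [t, r1, c1, r2, c2, dg] ∧
    0 ≤ r1 ∧ r1 ≤ r2 ∧ r2 < rn ∧ 0 ≤ c1 ∧ c1 ≤ c2 ∧ c2 < cn

-- basic list-update lemmas
theorem length_pvModifyAt {a : Type} (xs : List a) (n : Nat) (f : a -> a) :
    (pvModifyAt xs n f).length = xs.length := by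
  induction xs generalizing n with
  | nil => rfl
  | cons x xs ih => cases n with
    | zero => rfl
    | succ n => simp [pvModifyAt, ih]

theorem getD_pvModifyAt {a : Type} (xs : List a) (n : Nat) (f : a -> a) (j : Nat) (d : a) :
    (pvModifyAt xs n f).getD j d = if j = n ∧ n < xs.length then f (xs.getD n d) else xs.getD j d := by
  induction xs generalizing n j with
  | nil => simp [pvModifyAt]
  | cons x xs ih =>
    cases n with
    | zero =>
      cases j with
      | zero => simp [pvModifyAt]
      | succ j => simp [pvModifyAt]
    | succ n =>
      cases j with
      | zero => simp [pvModifyAt]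
      | succ j =>
        simp only [pvModifyAt, List.getD_cons_succ, List.length_cons, ih]
        by_cases h : j = n ∧ n < xs.length
        · rw [if_pos h, if_pos ⟨by omega, by omega⟩]
        · rw [if_neg h, if_neg (by omega)]

theorem length_pyModify {a : Type} (xs : List a) (i : Int) (f : a -> a) :
    (pyModify xs i f).length = xs.length := by
  simp [pyModify, length_pvModifyAt]

theorem pyGetD_nonneg {a : Type} (xs : List a) {i : Int} (d : a) (h : 0 ≤ i) :
    PySem.List.pyGetD xs i d = xs.getD i.toNat d := by
  simp [PySem.List.pyGetD, PySem.List.pyGet?_of_nonneg xs h, List.getD_eq_getElem?_getD]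

theorem getD_pyModify {a : Type} (xs : List a) (n : Int) (f : a -> a) (j : Nat) (d : a) (hn : 0 ≤ n) :
    (pyModify xs n f).getD j d =
      if (j : Int) = n ∧ n < (xs.length : Int) then f (xs.getD n.toNat d) else xs.getD j d := by
  have hlt : ¬ n < 0 := by omega
  simp only [pyModify, if_neg hlt]
  rw [getD_pvModifyAt]
  have hiff : (j = n.toNat ∧ n.toNat < xs.length) ↔ ((j : Int) = n ∧ n < (xs.length : Int)) := by omega
  by_cases h : (j : Int) = n ∧ n < (xs.length : Int)
  · rw [if_pos (hiff.mpr h), if_pos h]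
  · rw [if_neg (fun hc => h (hiff.mp hc)), if_neg h]

theorem rows_from_getD {P : List Int → Prop} (m : List (List Int))
    (h : ∀ i : Nat, i < m.length → P (m.getD i [])) : ∀ row ∈ m, P row := by
  intro row hrow
  obtain ⟨i, hi, rfl⟩ := List.getElem_of_mem hrow
  have := h i hi
  rwa [List.getD_eq_getElem?_getD, List.getElem?_eq_getElem hi] at this

theorem getD_mem {a : Type} (xs : List a) (i : Nat) (d : a) (h : i < xs.length) :
    xs.getD i d ∈ xs := by
  rw [List.getD_eq_getElem?_getD, List.getElem?_eq_getElem h]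
  simp [List.getElem_mem h]

-- A-side: corner updates
theorem cellN_mod2 (m : List (List Int)) (a b : Int) (f : Int → Int)
    (ha : 0 ≤ a) (ham : a < (m.length : Int)) (hb : 0 ≤ b)
    (hrow : ∀ row ∈ m, b < (row.length : Int)) (r c : Nat) :
    cellN (mod2 m a b f) r c =
      if (r : Int) = a ∧ (c : Int) = b then f (cellN m r c) else cellN m r c := by
  have hm2 : mod2 m a b f = pyModify m a (fun row => pyModify row b f) := rfl
  unfold cellN
  rw [hm2, getD_pyModify m a _ r [] ha]
  by_cases h1 : (r : Int) = a
  · rw [if_pos ⟨h1, ham⟩]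
    have hr : r < m.length := by omega
    have hat : a.toNat = r := by omega
    rw [hat]
    have hblen : b < ((m.getD r []).length : Int) := hrow _ (getD_mem m r [] hr)
    rw [getD_pyModify _ b f c 0 hb]
    by_cases h2 : (c : Int) = b
    · rw [if_pos ⟨h2, hblen⟩, if_pos ⟨h1, h2⟩]
      have hbt : b.toNat = c := by omega
      rw [hbt]
    · rw [if_neg (by tauto), if_neg (by tauto)]
  · rw [if_neg (by tauto), if_neg (by tauto)]

theorem length_mod2 (m : List (List Int)) (a b : Int) (f : Int → Int) :
    (mod2 m a b f).length = m.length := by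
  simp [mod2, length_pyModify]

theorem mem_pvModifyAt {a : Type} (xs : List a) (n : Nat) (f : a -> a) :
    ∀ x ∈ pvModifyAt xs n f, x ∈ xs ∨ ∃ y ∈ xs, x = f y := by
  induction xs generalizing n with
  | nil => intro x hx; simp [pvModifyAt] at hx
  | cons y ys ih =>
    cases n with
    | zero =>
      intro x hx
      rcases List.mem_cons.mp hx with rfl | hx
      · exact Or.inr ⟨y, List.mem_cons_self, rfl⟩
      · exact Or.inl (List.mem_cons_of_mem _ hx)
    | succ n =>
      intro x hx
      rcases List.mem_cons.mp hx with rfl | hx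
      · exact Or.inl List.mem_cons_self
      · rcases ih n x hx with h | ⟨z, hz, hfz⟩
        · exact Or.inl (List.mem_cons_of_mem _ h)
        · exact Or.inr ⟨z, List.mem_cons_of_mem _ hz, hfz⟩

theorem rowsLen_mod2 (m : List (List Int)) (a b : Int) (f : Int → Int) (L : Nat)
    (h : ∀ row ∈ m, row.length = L) : ∀ row ∈ mod2 m a b f, row.length = L := by
  intro row hrow
  have hrow' : row ∈ pvModifyAt m ((if a < 0 then a + (m.length : Int) else a)).toNat
      (fun r => pyModify r b f) := hrow
  rcases mem_pvModifyAt _ _ _ row hrow' with hm | ⟨y, hy, rfl⟩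
  · exact h row hm
  · rw [length_pyModify]; exact h y hy

theorem cellN_applyCorner (rn cn : Int) (m : List (List Int)) (s : List Int)
    (hok : SkOK rn cn s) (hlen : (m.length : Int) = rn + 1)
    (hrows : ∀ row ∈ m, row.length = cn.toNat + 1) (hcn : 0 ≤ cn) (r c : Nat) :
    cellN (applyCorner m s) r c = cellN m r c + corner s r c := by
  obtain ⟨t, r1, c1, r2, c2, dg, rfl, h1, h2, h3, h4, h5, h6⟩ := hok
  have hLrow : ∀ (mm : List (List Int)), (∀ row ∈ mm, row.length = cn.toNat + 1) →
      ∀ (bb : Int), bb < cn + 1 → ∀ row ∈ mm, bb < (row.length : Int) := by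
    intro mm hmm bb hbb row hr
    have := hmm row hr
    omega
  have hm1r := rowsLen_mod2 m r1 c1 (· + (if t = 1 then -dg else dg)) _ hrows
  have hm2r := rowsLen_mod2 _ r1 (c2 + 1) (· - (if t = 1 then -dg else dg)) _ hm1r
  have hm3r := rowsLen_mod2 _ (r2 + 1) c1 (· - (if t = 1 then -dg else dg)) _ hm2r
  have hm1l : ((mod2 m r1 c1 (· + (if t = 1 then -dg else dg))).length : Int) = rn + 1 := by
    rw [length_mod2]; exact hlen
  have hm2l : ((mod2 (mod2 m r1 c1 (· + (if t = 1 then -dg else dg))) r1 (c2 + 1)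
      (· - (if t = 1 then -dg else dg))).length : Int) = rn + 1 := by
    rw [length_mod2]; exact hm1l
  have hm3l : ((mod2 (mod2 (mod2 m r1 c1 (· + (if t = 1 then -dg else dg))) r1 (c2 + 1)
      (· - (if t = 1 then -dg else dg))) (r2 + 1) c1
      (· - (if t = 1 then -dg else dg))).length : Int) = rn + 1 := by
    rw [length_mod2]; exact hm2l
  show cellN (mod2 (mod2 (mod2 (mod2 m r1 c1 (· + (if t = 1 then -dg else dg))) r1 (c2 + 1)
      (· - (if t = 1 then -dg else dg))) (r2 + 1) c1 (· - (if t = 1 then -dg else dg))) (r2 + 1)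
      (c2 + 1) (· + (if t = 1 then -dg else dg))) r c = _
  rw [cellN_mod2 _ (r2 + 1) (c2 + 1) _ (by omega) (by omega) (by omega)
    (hLrow _ hm3r _ (by omega))]
  rw [cellN_mod2 _ (r2 + 1) c1 _ (by omega) (by omega) (by omega) (hLrow _ hm2r _ (by omega))]
  rw [cellN_mod2 _ r1 (c2 + 1) _ (by omega) (by omega) (by omega) (hLrow _ hm1r _ (by omega))]
  rw [cellN_mod2 _ r1 c1 _ (by omega) (by omega) (by omega) (hLrow _ hrows _ (by omega))]
  simp only [corner]
  split_ifs <;> omega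

theorem length_applyCorner (m : List (List Int)) (s : List Int) :
    (applyCorner m s).length = m.length := by
  cases s with
  | nil => rfl
  | cons a s => cases s with
    | nil => rfl
    | cons b s => cases s with
      | nil => rfl
      | cons x3 s => cases s with
        | nil => rfl
        | cons x4 s => cases s with
          | nil => rfl
          | cons x5 s => cases s with
            | nil => rfl
            | cons x6 s => cases s with
              | nil => simp [applyCorner, length_mod2]
              | cons x7 s => rfl

theorem rowsLen_applyCorner (m : List (List Int)) (s : List Int) (L : Nat)
    (h : ∀ row ∈ m, row.length = L) : ∀ row ∈ applyCorner m s, row.length = L := by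
  cases s with
  | nil => exact h
  | cons a s => cases s with
    | nil => exact h
    | cons b s => cases s with
      | nil => exact h
      | cons x3 s => cases s with
        | nil => exact h
        | cons x4 s => cases s with
          | nil => exact h
          | cons x5 s => cases s with
            | nil => exact h
            | cons x6 s => cases s with
              | nil =>
                exact rowsLen_mod2 _ _ _ _ _ (rowsLen_mod2 _ _ _ _ _
                  (rowsLen_mod2 _ _ _ _ _ (rowsLen_mod2 _ _ _ _ _ h)))
              | cons x7 s => exact h

theorem foldl_applyCorner (rn cn : Int) (skill : List (List Int)) (hcn : 0 ≤ cn)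
    (hall : ∀ s ∈ skill, SkOK rn cn s) :
    ∀ (m : List (List Int)), (m.length : Int) = rn + 1 →
      (∀ row ∈ m, row.length = cn.toNat + 1) →
      ((skill.foldl applyCorner m).length : Int) = rn + 1 ∧
      (∀ row ∈ skill.foldl applyCorner m, row.length = cn.toNat + 1) ∧
      ∀ r c : Nat, cellN (skill.foldl applyCorner m) r c = cellN m r c + Gtot skill r c := by
  revert hall
  induction skill with
  | nil =>
    intro hall m hlen hrows
    refine ⟨hlen, hrows, ?_⟩
    intro r c
    simp [Gtot]
  | cons s sk ih =>
    intro hall m hlen hrows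
    have hokS : SkOK rn cn s := hall s List.mem_cons_self
    have hall' : ∀ x ∈ sk, SkOK rn cn x := fun x hx => hall x (List.mem_cons_of_mem _ hx)
    have hlen1 : ((applyCorner m s).length : Int) = rn + 1 := by rw [length_applyCorner]; exact hlen
    have hrows1 := rowsLen_applyCorner m s _ hrows
    obtain ⟨ha, hb, hc⟩ := ih hall' (applyCorner m s) hlen1 hrows1
    refine ⟨by simpa using ha, by simpa using hb, ?_⟩
    intro r c
    have := hc r c
    simp only [List.foldl_cons]
    rw [this, cellN_applyCorner rn cn m s hokS hlen hrows hcn r c]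
    simp only [Gtot, List.map_cons, List.sum_cons]
    ring

-- A-side: the two prefix passes
theorem length_scanAux (d : Int) (ys : List Int) : (scanAux d ys).length = ys.length := by
  induction ys generalizing d with
  | nil => rfl
  | cons y ys ih => simp [scanAux, ih]

theorem length_rowScan (row : List Int) : (rowScan row).length = row.length := by
  cases row with
  | nil => rfl
  | cons x xs => simp [rowScan, length_scanAux]

theorem getD_scanAux (ys : List Int) : ∀ (d : Int) (j : Nat), j < ys.length →
    (scanAux d ys).getD j 0 = d + (ys.take (j + 1)).sum := by
  induction ys with
  | nil => intro d j hj; simp at hj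
  | cons y ys ih =>
    intro d j hj
    cases j with
    | zero => simp [scanAux]
    | succ j =>
      simp only [scanAux, List.getD_cons_succ]
      rw [ih (d + y) j (by simpa using hj)]
      simp [List.sum_cons]
      ring

theorem getD_rowScan (row : List Int) (j : Nat) (hj : j < row.length) :
    (rowScan row).getD j 0 = (row.take (j + 1)).sum := by
  cases row with
  | nil => simp at hj
  | cons x xs =>
    cases j with
    | zero => simp [rowScan]
    | succ j =>
      simp only [rowScan, List.getD_cons_succ]
      rw [getD_scanAux xs x j (by simpa using hj)]
      simp [List.sum_cons]

theorem getD_zipWith_add (a : List Int) : ∀ (b : List Int), a.length = b.length → ∀ (j : Nat),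
    (List.zipWith (· + ·) a b).getD j 0 = a.getD j 0 + b.getD j 0 := by
  induction a with
  | nil =>
    intro b hb j
    cases b with
    | nil => simp
    | cons y ys => simp at hb
  | cons x xs ih =>
    intro b hb j
    cases b with
    | nil => simp at hb
    | cons y ys =>
      cases j with
      | zero => simp
      | succ j => simpa using ih ys (by simpa using hb) j

theorem getD_colAux (L : Nat) (rs : List (List Int)) :
    ∀ (prev : List Int), prev.length = L → (∀ r ∈ rs, r.length = L) →
    ∀ (i : Nat), i < rs.length → ∀ (j : Nat),
      ((colAux prev rs).getD i []).getD j 0 =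
        prev.getD j 0 + ((rs.take (i + 1)).map (fun row => row.getD j 0)).sum := by
  induction rs with
  | nil => intro prev hp hrs i hi; simp at hi
  | cons r rs ih =>
    intro prev hp hrs i hi j
    have hrL : r.length = L := hrs r List.mem_cons_self
    have hzlen : (List.zipWith (· + ·) prev r).length = L := by
      simp [List.length_zipWith, hp, hrL]
    cases i with
    | zero =>
      simp only [colAux, List.getD_cons_zero, List.take_succ_cons, List.take_zero,
        List.map_cons, List.map_nil, List.sum_cons, List.sum_nil, add_zero]
      exact getD_zipWith_add prev r (by omega) j
    | succ i =>
      simp only [colAux, List.getD_cons_succ, List.take_succ_cons, List.map_cons, List.sum_cons]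
      rw [ih _ hzlen (fun x hx => hrs x (List.mem_cons_of_mem _ hx)) i (by simpa using hi) j]
      rw [getD_zipWith_add prev r (by omega) j]
      ring

theorem getD_colScan (L : Nat) (m : List (List Int)) (hL : ∀ r ∈ m, r.length = L)
    (i : Nat) (hi : i < m.length) (j : Nat) :
    ((colScan m).getD i []).getD j 0 = ((m.take (i + 1)).map (fun row => row.getD j 0)).sum := by
  cases m with
  | nil => simp at hi
  | cons r rs =>
    cases i with
    | zero => simp [colScan]
    | succ i =>
      simp only [colScan, List.getD_cons_succ, List.take_succ_cons, List.map_cons, List.sum_cons]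
      rw [getD_colAux ((r : List Int).length) rs r rfl
        (fun x hx => by rw [hL x (List.mem_cons_of_mem _ hx), hL r List.mem_cons_self])
        i (by simpa using hi) j]

-- sums over take / range
theorem sum_map_take {a : Type} (xs : List a) (f : a → Int) (d : a) :
    ∀ (n : Nat), n ≤ xs.length →
      ((xs.take n).map f).sum = ∑ k ∈ Finset.range n, f (xs.getD k d) := by
  intro n
  induction n with
  | zero => intro h; simp
  | succ n ih =>
    intro h
    have hn : n < xs.length := by omega
    rw [List.take_add_one, List.getElem?_eq_getElem hn]
    simp only [Option.toList_some, List.map_append, List.sum_append, List.map_cons,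
      List.map_nil, List.sum_cons, List.sum_nil, add_zero]
    rw [ih (by omega), Finset.sum_range_succ, List.getD_eq_getElem?_getD,
      List.getElem?_eq_getElem hn]
    simp

theorem sum_take_int (xs : List Int) (n : Nat) (h : n ≤ xs.length) :
    (xs.take n).sum = ∑ k ∈ Finset.range n, xs.getD k 0 := by
  have := sum_map_take xs id 0 n h
  simpa using this

theorem sum_range_indicator (a x : Int) (ha : 0 ≤ a) : ∀ (n : Nat),
    (∑ c ∈ Finset.range n, if (c : Int) = a then x else 0) = if a < (n : Int) then x else 0 := by
  intro n
  induction n with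
  | zero => rw [Finset.sum_range_zero, if_neg (by omega)]
  | succ n ih =>
    rw [Finset.sum_range_succ, ih]
    split_ifs <;> omega

theorem sum2_indicator (a b x : Int) (ha : 0 ≤ a) (hb : 0 ≤ b) (n m : Nat) :
    (∑ r ∈ Finset.range n, ∑ c ∈ Finset.range m, if (r : Int) = a ∧ (c : Int) = b then x else 0)
      = if a < (n : Int) ∧ b < (m : Int) then x else 0 := by
  induction n with
  | zero => rw [Finset.sum_range_zero, if_neg (by omega)]
  | succ n ih =>
    rw [Finset.sum_range_succ, ih]
    have hinner : (∑ c ∈ Finset.range m, if (n : Int) = a ∧ (c : Int) = b then x else 0)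
        = if (n : Int) = a then (if b < (m : Int) then x else 0) else 0 := by
      by_cases hna : (n : Int) = a
      · rw [if_pos hna, ← sum_range_indicator b x hb m]
        exact Finset.sum_congr rfl (fun c _ => by rw [if_congr (by tauto) rfl rfl])
      · rw [if_neg hna]
        exact Finset.sum_eq_zero (fun c _ => by rw [if_neg (by tauto)])
    rw [hinner]
    split_ifs <;> omega

theorem corner_sum (rn cn : Int) (s : List Int) (hok : SkOK rn cn s) (i j : Nat) :
    (∑ r ∈ Finset.range (i + 1), ∑ c ∈ Finset.range (j + 1), corner s r c)
      = contrib s (i : Int) (j : Int) := by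
  obtain ⟨t, r1, c1, r2, c2, dg, rfl, h1, h2, h3, h4, h5, h6⟩ := hok
  simp only [corner, contrib, Finset.sum_sub_distrib, Finset.sum_add_distrib]
  rw [sum2_indicator r1 c1 _ (by omega) (by omega),
    sum2_indicator r1 (c2 + 1) _ (by omega) (by omega),
    sum2_indicator (r2 + 1) c1 _ (by omega) (by omega),
    sum2_indicator (r2 + 1) (c2 + 1) _ (by omega) (by omega)]
  split_ifs <;> omega

theorem sum_Gtot (rn cn : Int) (skill : List (List Int)) (hall : ∀ s ∈ skill, SkOK rn cn s)
    (i j : Nat) :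
    (∑ r ∈ Finset.range (i + 1), ∑ c ∈ Finset.range (j + 1), Gtot skill r c)
      = Ftot skill (i : Int) (j : Int) := by
  revert hall
  induction skill with
  | nil => intro hall; simp [Gtot, Ftot]
  | cons s sk ih =>
    intro hall
    have hokS : SkOK rn cn s := hall s List.mem_cons_self
    have hall' : ∀ x ∈ sk, SkOK rn cn x := fun x hx => hall x (List.mem_cons_of_mem _ hx)
    simp only [Gtot, Ftot, List.map_cons, List.sum_cons, Finset.sum_add_distrib]
    rw [corner_sum rn cn s hokS i j]
    have hrec := ih hall'
    simp only [Gtot, Ftot] at hrec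
    rw [hrec]

theorem len6 {a : Type} (s : List a) (h : s.length = 6) :
    ∃ x1 x2 x3 x4 x5 x6, s = [x1, x2, x3, x4, x5, x6] := by
  cases s with
  | nil => simp at h
  | cons a s => cases s with
    | nil => simp at h
    | cons b s => cases s with
      | nil => simp at h
      | cons x3 s => cases s with
        | nil => simp at h
        | cons x4 s => cases s with
          | nil => simp at h
          | cons x5 s => cases s with
            | nil => simp at h
            | cons x6 s => cases s with
              | nil => exact ⟨a, b, x3, x4, x5, x6, rfl⟩
              | cons x7 s => simp at h

theorem pre_skOK (board skill : List (List Int)) (hpre : Pre_solution board skill) :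
    ∀ s ∈ skill, SkOK (board.length : Int) ((board.getD 0 []).length : Int) s := by
  intro s hs
  obtain ⟨hne, hrows, hsk⟩ := hpre
  obtain ⟨h6, hb1, hb2, hb3, hb4, hb5, hb6⟩ := hsk s hs
  obtain ⟨x1, x2, x3, x4, x5, x6, rfl⟩ := len6 s h6
  exact ⟨x1, x2, x3, x4, x5, x6, rfl, hb1, hb2, hb3, hb4, hb5, hb6⟩


-- ===== VERDICT (by name: the statement is the Claim_ definition above) =====

-- A-side assembly
theorem cellN_diff0 (R C r c : Nat) :
    cellN (List.replicate R (List.replicate C (0 : Int))) r c = 0 := by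
  simp only [cellN, List.getD_eq_getElem?_getD, List.getElem?_replicate]
  split_ifs <;> simp

theorem cell_diff3 (board skill : List (List Int)) (hpre : Pre_solution board skill)
    (i j : Nat) (hi : i < board.length) (hj : j < (board.getD 0 []).length) :
    cellN (colScan ((skill.foldl applyCorner
        (List.replicate ((board.length : Int).toNat + 1)
          (List.replicate (((PySem.List.pyGetD board 0 []).length : Int).toNat + 1) (0 : Int)))).map rowScan)) i j
      = Ftot skill (i : Int) (j : Int) := by
  have hall := pre_skOK board skill hpre
  obtain ⟨hne, hrows0, hskp⟩ := hpre
  have h0 : PySem.List.pyGetD board 0 [] = board.getD 0 [] := by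
    rw [pyGetD_nonneg board [] (by omega)]; rfl
  rw [h0]
  simp only [Int.toNat_natCast]
  set R := board.length with hR
  set cn := (board.getD 0 []).length with hcn
  have hd0len : ((List.replicate (R + 1) (List.replicate (cn + 1) (0 : Int))).length : Int)
      = (R : Int) + 1 := by simp
  have hd0rows : ∀ row ∈ List.replicate (R + 1) (List.replicate (cn + 1) (0 : Int)),
      row.length = ((cn : Int)).toNat + 1 := by
    intro row hr
    rw [List.eq_of_mem_replicate hr]
    simp
  obtain ⟨hl1, hr1, hc1⟩ := foldl_applyCorner (R : Int) (cn : Int) skill (by omega) hall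
    (List.replicate (R + 1) (List.replicate (cn + 1) (0 : Int))) hd0len hd0rows
  set diff1 := skill.foldl applyCorner (List.replicate (R + 1) (List.replicate (cn + 1) (0 : Int)))
  have hrows2 : ∀ row ∈ diff1.map rowScan, row.length = cn + 1 := by
    intro row hr
    obtain ⟨row', hmem, rfl⟩ := List.mem_map.mp hr
    rw [length_rowScan]
    have := hr1 row' hmem
    omega
  have hlen1 : diff1.length = R + 1 := by omega
  unfold cellN
  rw [getD_colScan (cn + 1) (diff1.map rowScan) hrows2 i (by simp [hlen1]; omega) j]
  rw [← List.map_take, List.map_map]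
  rw [sum_map_take diff1 _ [] (i + 1) (by omega)]
  have hstep : ∀ r ∈ Finset.range (i + 1),
      ((fun row => row.getD j 0) ∘ rowScan) (diff1.getD r [])
        = ∑ cix ∈ Finset.range (j + 1), Gtot skill r cix := by
    intro r hr
    have hrlen : (diff1.getD r []).length = ((cn : Int)).toNat + 1 :=
      hr1 _ (getD_mem diff1 r [] (by rw [hlen1]; have := Finset.mem_range.mp hr; omega))
    simp only [Function.comp]
    rw [getD_rowScan _ j (by omega), sum_take_int _ (j + 1) (by omega)]
    apply Finset.sum_congr rfl
    intro cix _
    have hcix := hc1 r cix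
    rw [cellN_diff0 (R + 1) (cn + 1) r cix, zero_add] at hcix
    exact hcix
  rw [Finset.sum_congr rfl hstep]
  exact sum_Gtot (R : Int) (cn : Int) skill hall i j

-- B-side
theorem length_inner_fold (d : Int) (l : List Int) : ∀ (row : List Int),
    (l.foldl (fun r j => pyModify r j (· + d)) row).length = row.length := by
  induction l with
  | nil => intro row; rfl
  | cons x xs ih => intro row; rw [List.foldl_cons, ih, length_pyModify]

theorem inner_spec (d c1 : Int) (hc1 : 0 ≤ c1) : ∀ (n : Nat) (row : List Int),
    c1 + n ≤ (row.length : Int) →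
    (((PySem.List.pyRange c1 (c1 + n) 1).foldl (fun r j => pyModify r j (· + d)) row).length = row.length) ∧
    ∀ (j : Nat), ((PySem.List.pyRange c1 (c1 + n) 1).foldl (fun r j => pyModify r j (· + d)) row).getD j 0
      = row.getD j 0 + (if c1 ≤ (j : Int) ∧ (j : Int) < c1 + n then d else 0) := by
  intro n
  induction n with
  | zero =>
    intro row hlen
    rw [show c1 + ((0 : Nat) : Int) = c1 by simp, PySem.List.pyRange_one_eq_nil (le_refl c1)]
    refine ⟨rfl, ?_⟩
    intro j
    rw [List.foldl_nil, if_neg (by omega), add_zero]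
  | succ n ih =>
    intro row hlen
    have hcast : c1 + ((n + 1 : Nat) : Int) = (c1 + (n : Nat)) + 1 := by push_cast; ring
    rw [hcast, PySem.List.pyRange_one_succ_right (by omega), List.foldl_append]
    simp only [List.foldl_cons, List.foldl_nil]
    obtain ⟨ihlen, ihval⟩ := ih row (by omega)
    refine ⟨by rw [length_pyModify, ihlen], ?_⟩
    intro j
    rw [getD_pyModify _ (c1 + (n : Nat)) _ j 0 (by omega)]
    by_cases hj : (j : Int) = c1 + (n : Nat)
    · rw [if_pos ⟨hj, by rw [ihlen]; omega⟩]
      have ht : (c1 + ((n : Nat) : Int)).toNat = j := by omega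
      rw [ht, ihval j, if_neg (by omega), if_pos (by omega)]
      omega
    · rw [if_neg (by tauto), ihval j]
      by_cases h2 : c1 ≤ (j : Int) ∧ (j : Int) < c1 + (n : Nat)
      · rw [if_pos h2, if_pos (by omega)]
      · rw [if_neg h2, if_neg (by omega)]

theorem outer_spec (r1 : Int) (hr1 : 0 ≤ r1) (g : List Int → List Int)
    (_hg : ∀ row, (g row).length = row.length) : ∀ (n : Nat) (m : List (List Int)),
    r1 + n ≤ (m.length : Int) →
    (((PySem.List.pyRange r1 (r1 + n) 1).foldl (fun m i => pyModify m i g) m).length = m.length) ∧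
    ∀ (i : Nat), ((PySem.List.pyRange r1 (r1 + n) 1).foldl (fun m i => pyModify m i g) m).getD i []
      = if r1 ≤ (i : Int) ∧ (i : Int) < r1 + n then g (m.getD i []) else m.getD i [] := by
  intro n
  induction n with
  | zero =>
    intro m hlen
    rw [show r1 + ((0 : Nat) : Int) = r1 by simp, PySem.List.pyRange_one_eq_nil (le_refl r1)]
    refine ⟨rfl, ?_⟩
    intro i
    rw [List.foldl_nil, if_neg (by omega)]
  | succ n ih =>
    intro m hlen
    have hcast : r1 + ((n + 1 : Nat) : Int) = (r1 + (n : Nat)) + 1 := by push_cast; ring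
    rw [hcast, PySem.List.pyRange_one_succ_right (by omega), List.foldl_append]
    simp only [List.foldl_cons, List.foldl_nil]
    obtain ⟨ihlen, ihval⟩ := ih m (by omega)
    refine ⟨by rw [length_pyModify, ihlen], ?_⟩
    intro i
    rw [getD_pyModify _ (r1 + (n : Nat)) _ i [] (by omega)]
    by_cases hi : (i : Int) = r1 + (n : Nat)
    · rw [if_pos ⟨hi, by rw [ihlen]; omega⟩]
      have ht : (r1 + ((n : Nat) : Int)).toNat = i := by omega
      rw [ht, ihval i, if_neg (by omega), if_pos (by omega)]
    · rw [if_neg (by tauto), ihval i]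
      by_cases h2 : r1 ≤ (i : Int) ∧ (i : Int) < r1 + (n : Nat)
      · rw [if_pos h2, if_pos (by omega)]
      · rw [if_neg h2, if_neg (by omega)]

theorem addRect_spec (rn cn : Int) (m : List (List Int)) (s : List Int)
    (hok : SkOK rn cn s) (hlen : rn ≤ (m.length : Int))
    (hrows : ∀ row ∈ m, cn ≤ (row.length : Int)) :
    ((addRect m s).length = m.length) ∧
    (∀ i : Nat, ((addRect m s).getD i []).length = (m.getD i []).length) ∧
    ∀ i j : Nat, cellN (addRect m s) i j = cellN m i j + contrib s (i : Int) (j : Int) := by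
  obtain ⟨t, r1, c1, r2, c2, dg, rfl, h1, h2, h3, h4, h5, h6⟩ := hok
  have hg : ∀ row, (((PySem.List.pyRange c1 (c2 + 1) 1).foldl
      (fun r j => pyModify r j (· + (if t = 1 then -dg else dg))) row)).length = row.length :=
    fun row => length_inner_fold _ _ row
  have hn1 : r1 + (((r2 + 1 - r1).toNat : Nat) : Int) = r2 + 1 := by omega
  have hn2 : c1 + (((c2 + 1 - c1).toNat : Nat) : Int) = c2 + 1 := by omega
  obtain ⟨olen, oval⟩ := outer_spec r1 (by omega) _ hg (r2 + 1 - r1).toNat m (by omega)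
  have hshow : addRect m [t, r1, c1, r2, c2, dg] =
      (PySem.List.pyRange r1 (r1 + (((r2 + 1 - r1).toNat : Nat) : Int)) 1).foldl
        (fun m i => pyModify m i (fun row => (PySem.List.pyRange c1 (c2 + 1) 1).foldl
          (fun r j => pyModify r j (· + (if t = 1 then -dg else dg))) row)) m := by
    rw [hn1]; rfl
  have hinner : ∀ row : List Int, cn ≤ (row.length : Int) → ∀ j : Nat,
      ((PySem.List.pyRange c1 (c2 + 1) 1).foldl
        (fun r j => pyModify r j (· + (if t = 1 then -dg else dg))) row).getD j 0
      = row.getD j 0 + (if c1 ≤ (j : Int) ∧ (j : Int) ≤ c2 then (if t = 1 then -dg else dg) else 0) := by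
    intro row hrow j
    obtain ⟨ilen, ival⟩ := inner_spec (if t = 1 then -dg else dg) c1 (by omega)
      (c2 + 1 - c1).toNat row (by omega)
    rw [← hn2, ival j]
    by_cases h2 : c1 ≤ (j : Int) ∧ (j : Int) ≤ c2
    · rw [if_pos (by omega), if_pos h2]
    · rw [if_neg (by omega), if_neg h2]
  refine ⟨?_, ?_, ?_⟩
  · rw [hshow, olen]
  · intro i
    rw [hshow, oval i]
    by_cases hi : r1 ≤ (i : Int) ∧ (i : Int) < r1 + (((r2 + 1 - r1).toNat : Nat) : Int)
    · rw [if_pos hi, hg]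
    · rw [if_neg hi]
  · intro i j
    unfold cellN
    rw [hshow, oval i]
    by_cases hi : r1 ≤ (i : Int) ∧ (i : Int) < r1 + (((r2 + 1 - r1).toNat : Nat) : Int)
    · rw [if_pos hi]
      have him : i < m.length := by omega
      have hrl : cn ≤ ((m.getD i []).length : Int) := hrows _ (getD_mem m i [] him)
      rw [hinner _ hrl j]
      simp only [contrib]
      split_ifs <;> omega
    · rw [if_neg hi]
      simp only [contrib]
      rw [if_neg (by omega), add_zero]

theorem foldl_addRect (rn cn : Int) (skill : List (List Int))
    (hall : ∀ s ∈ skill, SkOK rn cn s) :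
    ∀ (m : List (List Int)), rn ≤ (m.length : Int) →
      (∀ row ∈ m, cn ≤ (row.length : Int)) →
      ((skill.foldl addRect m).length = m.length) ∧
      (∀ i : Nat, ((skill.foldl addRect m).getD i []).length = (m.getD i []).length) ∧
      ∀ i j : Nat, cellN (skill.foldl addRect m) i j = cellN m i j + Ftot skill (i : Int) (j : Int) := by
  revert hall
  induction skill with
  | nil =>
    intro hall m hlen hrows
    refine ⟨rfl, fun i => rfl, ?_⟩
    intro i j
    simp [Ftot]
  | cons s sk ih =>
    intro hall m hlen hrows
    have hokS : SkOK rn cn s := hall s List.mem_cons_self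
    have hall' : ∀ x ∈ sk, SkOK rn cn x := fun x hx => hall x (List.mem_cons_of_mem _ hx)
    obtain ⟨alen, arow, acell⟩ := addRect_spec rn cn m s hokS hlen hrows
    have hlen1 : rn ≤ ((addRect m s).length : Int) := by rw [alen]; exact hlen
    have hrows1 : ∀ row ∈ addRect m s, cn ≤ (row.length : Int) := by
      apply rows_from_getD
      intro i hi
      have : ((addRect m s).getD i []).length = (m.getD i []).length := arow i
      have hmem : m.getD i [] ∈ m := getD_mem m i [] (by rw [← alen]; exact hi)
      have := hrows _ hmem
      omega
    obtain ⟨flen, frow, fcell⟩ := ih hall' (addRect m s) hlen1 hrows1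
    refine ⟨?_, ?_, ?_⟩
    · simp only [List.foldl_cons]; rw [flen, alen]
    · intro i
      simp only [List.foldl_cons]
      rw [frow i, arow i]
    · intro i j
      simp only [List.foldl_cons]
      rw [fcell i j, acell i j]
      simp only [Ftot, List.map_cons, List.sum_cons]
      ring

theorem solution_spec : Claim_equal_solution := by
  intro board skill hdom hpre
  have hall := pre_skOK board skill hpre
  have hcd3 := cell_diff3 board skill hpre
  obtain ⟨hne, hrows0, hskp⟩ := hpre
  show solution board skill = solution_alt board skill
  obtain ⟨hblen, hbrow, hbcell⟩ := foldl_addRect (board.length : Int)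
    ((board.getD 0 []).length : Int) skill hall board (by omega)
    (fun row h => by have := hrows0 row h; omega)
  unfold solution solution_alt
  dsimp only
  rw [hblen]
  have hb0 : (PySem.List.pyGetD (skill.foldl addRect board) 0 []).length
      = (PySem.List.pyGetD board 0 []).length := by
    rw [pyGetD_nonneg (skill.foldl addRect board) [] (by omega),
      pyGetD_nonneg board [] (by omega)]
    simpa using hbrow 0
  rw [hb0]
  apply PySem.List.foldl_congr_mem
  intro acc i hi
  apply PySem.List.foldl_congr_mem
  intro acc2 j hj
  rw [PySem.List.mem_pyRange_one] at hi hj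
  have h0g : PySem.List.pyGetD board 0 [] = board.getD 0 [] := by
    rw [pyGetD_nonneg board [] (by omega)]; rfl
  have hiN : i = ((i.toNat : Nat) : Int) := by omega
  have hjN : j = ((j.toNat : Nat) : Int) := by omega
  rw [hiN, hjN]
  simp only [PySem.List.pyGetD_natCast]
  have hA := hcd3 i.toNat j.toNat (by omega) (by rw [h0g] at hj; omega)
  have hB := hbcell i.toNat j.toNat
  unfold cellN at hA hB
  rw [hA, hB]
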